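-- pv_equiv track=rewrite | github.com/VaHiX/CodeForces | Python/ByTier/E/1763_E_Node_Pairs.py | solve
-- ===== SOURCE A (Python) =====
-- def bc2(n):
--     # Calculate binomial coefficient C(n, 2) = n * (n - 1) / 2
--     return n * (n - 1) // 2
--
-- def solve(p):
--     assert 0 <= p <= 2 * 10**5
--     # dp[k] represents the minimum number of nodes to form exactly k mutually reachable pairs
--     dp = [2 * p] * (p + 1)
--     dp[0] = 0  # Base case: 0 nodes needed to make 0 mutually reachable pairs
--
--     # Fill the dp array
--     for k in range(1, p + 1):
--         i = 2  # Start with clique size 2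
--         # Loop while the number of pairs in a clique of size i is <= k
--         while bc2(i) <= k:
--             dp[k] = min(dp[k], dp[k - bc2(i)] + i)  # Transition: add a clique of size i
--             i += 1  # Try larger clique
--
--     # N is the minimum number of nodes needed to reach p mutually reachable pairs
--     N = dp[p]
--     # Compute maximum number of unidirectional pairs
--     # G = total pairs - mutually reachable pairs = C(N, 2) - p
--     G = bc2(N) - p
--     return N, G
-- ===== SOURCE B (Python) =====
-- def solve(p):
--     assert 0 <= p <= 2 * 10**5
--     # Uniform-cost search (Dial's algorithm) on pair-count states: an edge adds one
--     # clique of size s, i.e. t = s*(s-1)//2 pairs at node cost s.  States are settled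
--     # in increasing order of node cost c; stop once the target state p is settled.
--     steps = []
--     i = 2
--     while i * (i - 1) // 2 <= p:
--         steps.append((i * (i - 1) // 2, i))
--         i += 1
--     dist = [2 * p] * (p + 1)
--     dist[0] = 0
--     c = 0
--     while dist[p] > c:
--         for k in range(p + 1):
--             if dist[k] == c:
--                 for t, s in steps:
--                     if k + t <= p and c + s < dist[k + t]:
--                         dist[k + t] = c + s
--         c += 1
--     N = dist[p]
--     return N, N * (N - 1) // 2 - p
-- ===== Notes on version B (the rewrite author's own statement) =====
-- stated objective: faster
-- what changed: Replaces A's bottom-up pull-DP (for each pair count k, an inner while re-deriving every usable clique size) by a uniform-cost search (Dial's algorithm): pair-count states are settled layer by layer in increasing node-cost order, relaxing push-edges (add one clique) out of each settled state, and the search stops as soon as the target state p is settled.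
import Mathlib
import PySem

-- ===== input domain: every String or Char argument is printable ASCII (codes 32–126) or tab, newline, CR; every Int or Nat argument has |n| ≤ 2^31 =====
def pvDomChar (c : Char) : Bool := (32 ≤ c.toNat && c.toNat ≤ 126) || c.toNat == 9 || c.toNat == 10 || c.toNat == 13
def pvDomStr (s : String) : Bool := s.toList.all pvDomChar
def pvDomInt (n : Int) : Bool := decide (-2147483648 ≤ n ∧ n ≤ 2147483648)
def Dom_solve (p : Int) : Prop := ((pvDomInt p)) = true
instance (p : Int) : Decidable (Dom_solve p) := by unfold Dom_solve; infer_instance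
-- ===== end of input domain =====

-- B replaces A's bottom-up pull-DP (for each k, an inner while over clique sizes) by a
-- uniform-cost search (Dial's algorithm): pair-count states are settled in increasing order
-- of node cost, relaxing push-edges from each settled state, stopping once p is settled
-- (measured faster by a constant factor).

-- ===== PORT A =====
def bc2 (n : Int) : Int := PySem.Int.floordiv (n * (n - 1)) 2

-- A's inner while loop: `while bc2(i) <= k: dp[k] = min(dp[k], dp[k - bc2(i)] + i); i += 1`
-- (indices are nonnegative where read, so `.toNat` / getD are exact here;
-- `fuel` only makes the recursion structural: k + 1 iterations always suffice,
-- since the loop's own test bc2(i) <= k fails once i ≥ k + 2)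
def solveWhile : Nat → Nat → Nat → List Int → List Int
  | 0, _, _, dp => dp
  | fuel + 1, k, i, dp =>
    if bc2 (i : Int) ≤ (k : Int) then
      solveWhile fuel k (i + 1)
        (dp.set k (min (dp.getD k 0) (dp.getD (k - (bc2 (i : Int)).toNat) 0 + (i : Int))))
    else dp

def solve (p : Int) : Int × Int :=
  let n := p.toNat
  let dp0 : List Int := (List.replicate (n + 1) (2 * p)).set 0 0
  let dp := (List.range' 1 n).foldl (fun dp k => solveWhile (k + 1) k 2 dp) dp0
  let N := dp.getD n 0
  (N, bc2 N - p)

-- ===== PORT B =====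
-- B's first while loop: collect edge items (i*(i-1)//2, i) while the pair count fits
-- (i ≥ 0 throughout, so Nat division is exactly Python's //; `fuel` only makes the
-- recursion structural: p + 1 iterations suffice, the loop's test fails once i ≥ p + 2)
def itemsB : Nat → Int → Nat → List (Nat × Nat)
  | 0, _, _ => []
  | fuel + 1, p, i =>
    if ((i * (i - 1) / 2 : Nat) : Int) ≤ p then
      (i * (i - 1) / 2, i) :: itemsB fuel p (i + 1)
    else []

-- B's innermost loop: `for t, s in steps: if k + t <= p and c + s < dist[k+t]: dist[k+t] = c + s`
def relaxB (steps : List (Nat × Nat)) (n c k : Nat) (dist : List Int) : List Int :=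
  steps.foldl
    (fun dist ts =>
      if k + ts.1 ≤ n ∧ ((c + ts.2 : Nat) : Int) < dist.getD (k + ts.1) 0 then
        dist.set (k + ts.1) ((c + ts.2 : Nat) : Int)
      else dist) dist

-- B's scan of one cost layer: `for k in range(p + 1): if dist[k] == c: <relax>`
def layerB (steps : List (Nat × Nat)) (n c : Nat) (dist : List Int) : List Int :=
  (List.range (n + 1)).foldl
    (fun dist k => if dist.getD k 0 = (c : Int) then relaxB steps n c k dist else dist) dist

-- B's outer while loop: `while dist[p] > c: <layer>; c += 1`
-- (`fuel` only makes the recursion structural: 2p + 1 iterations always suffice,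
-- since dist[p] ≤ 2p throughout)
def loopB (steps : List (Nat × Nat)) (n : Nat) : Nat → Nat → List Int → List Int
  | 0, _, dist => dist
  | fuel + 1, c, dist =>
    if (c : Int) < dist.getD n 0 then loopB steps n fuel (c + 1) (layerB steps n c dist)
    else dist

def solve_alt (p : Int) : Int × Int :=
  let n := p.toNat
  let steps := itemsB (n + 1) p 2
  let dist0 : List Int := (List.replicate (n + 1) (2 * p)).set 0 0
  let dist := loopB steps n (2 * n + 1) 0 dist0
  let N := dist.getD n 0
  (N, PySem.Int.floordiv (N * (N - 1)) 2 - p)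

-- ===== PRECONDITION & SPEC =====
-- Pre_ excludes exactly the inputs on which A's `assert 0 <= p <= 2*10**5` raises AssertionError.
def Pre_solve (p : Int) : Prop := 0 ≤ p ∧ p ≤ 200000
instance (p : Int) : Decidable (Pre_solve p) := by unfold Pre_solve; infer_instance
def pvWitness_solve : Int := 5

def Spec_solve (p : Int) (out : Int × Int) : Prop := out = solve_alt p
instance (p : Int) (out : Int × Int) : Decidable (Spec_solve p out) := by unfold Spec_solve; infer_instance

-- ===== CLAIM (what is proved, stated in full; the proofs are below) =====
def Claim_equal_solve : Prop := ∀ (p : Int), Dom_solve p → Pre_solve p → Spec_solve p (solve p)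

-- ===== LEMMAS AND PROOFS =====

-- arithmetic facts about bc2 / triangular numbers
theorem pv_bc2_natCast (i : Nat) : bc2 (i : Int) = ((i * (i - 1) / 2 : Nat) : Int) := by
  cases i with
  | zero => decide
  | succ m =>
    have : ((m+1 : Nat) : Int) * (((m+1 : Nat) : Int) - 1) = (((m+1) * m : Nat) : Int) := by
      push_cast; ring
    simp only [bc2, this]
    rw [show (2 : Int) = ((2 : Nat) : Int) by rfl, PySem.Int.floordiv_natCast]
    simp

theorem pv_tri_lb (i : Nat) (h : 2 ≤ i) : i - 1 ≤ i * (i - 1) / 2 := by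
  have h1 : 2 * (i - 1) ≤ i * (i - 1) := Nat.mul_le_mul_right _ h
  calc i - 1 = 2 * (i - 1) / 2 := by omega
    _ ≤ i * (i - 1) / 2 := Nat.div_le_div_right h1

-- triangular numbers: T i = i*(i-1)/2, number of pairs in a clique of size i
def T : Nat → Nat
  | 0 => 0
  | i + 1 => T i + i

theorem two_T (i : Nat) : 2 * T i = i * (i - 1) := by
  induction i with
  | zero => rfl
  | succ m ih =>
    cases m with
    | zero => rfl
    | succ l =>
      simp only [T] at *
      have : (l + 1 + 1) * (l + 1 + 1 - 1) = (l + 1) * (l + 1 - 1) + 2 * (l + 1) := by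
        simp; ring
      omega

theorem T_eq (i : Nat) : T i = i * (i - 1) / 2 := by have := two_T i; omega

theorem T_mono {i j : Nat} (h : i ≤ j) : T i ≤ T j := by
  induction j with
  | zero => simp_all
  | succ m ih =>
    rcases Nat.lt_or_ge i (m+1) with h' | h'
    · have := ih (by omega); simp only [T]; omega
    · have : i = m + 1 := by omega
      subst this; rfl

theorem T_pos {j : Nat} (h : 2 ≤ j) : 1 ≤ T j := by
  have := T_mono h; simpa using this

-- G S j k : the capped minimum node cost to form exactly k pairs with cliques of size ≤ j
-- (S = the 2*p sentinel; j = 1 means "no cliques usable")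
def G (S : Int) (j k : Nat) : Int :=
  if k = 0 then 0
  else if j < 2 then S
  else if h : T j ≤ k then
    min (G S (j - 1) k) (G S j (k - T j) + (j : Int))
  else G S (j - 1) k
termination_by (j, k)
decreasing_by
  · left; omega
  · right
    have := T_pos (by omega : 2 ≤ j)
    omega
  · left; omega

theorem G_zero (S : Int) (j : Nat) : G S j 0 = 0 := by unfold G; simp

theorem G_base (S : Int) {j k : Nat} (hk : 1 ≤ k) (hj : j ≤ 1) : G S j k = S := by
  unfold G; simp [show ¬ (k = 0) by omega, show j < 2 by omega]

theorem G_step_down (S : Int) {j m : Nat} (h2 : 2 ≤ j) (h : m < T j) :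
    G S j m = G S (j - 1) m := by
  rcases Nat.eq_zero_or_pos m with rfl | hm
  · rw [G_zero, G_zero]
  · conv_lhs => rw [G]
    simp [show ¬ (m = 0) by omega, show ¬ (j < 2) by omega, show ¬ (T j ≤ m) by omega]

theorem G_succ_le (S : Int) (j k : Nat) : G S (j + 1) k ≤ G S j k := by
  rcases Nat.eq_zero_or_pos k with rfl | hk
  · rw [G_zero, G_zero]
  · rcases Nat.lt_or_ge (j + 1) 2 with h2 | h2
    · rw [G_base S hk (by omega), G_base S hk (by omega)]
    · conv_lhs => rw [G]
      simp only [show ¬ (k = 0) by omega, if_false, show ¬ (j + 1 < 2) by omega,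
        Nat.add_sub_cancel]
      split
      · exact min_le_left _ _
      · exact le_refl _

theorem G_mono_j (S : Int) {j j' : Nat} (k : Nat) (h : j ≤ j') : G S j' k ≤ G S j k := by
  induction h with
  | refl => exact le_refl _
  | step h ih => exact le_trans (G_succ_le S _ k) ih

theorem G_le_S (S : Int) {j k : Nat} (hk : 1 ≤ k) : G S j k ≤ S := by
  rcases Nat.lt_or_ge j 1 with h | h
  · rw [G_base S hk (by omega)]
  · exact le_trans (G_mono_j S k h) (le_of_eq (G_base S hk (le_refl 1)))

-- using a clique of size j once, at the top, never hurts
theorem G_self_step (S : Int) (k j : Nat) (hj : 2 ≤ j) (hT : T j ≤ k) :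
    G S j k ≤ G S j (k - T j) + (j : Int) := by
  have hk : k ≠ 0 := by have := T_pos hj; omega
  conv_lhs => rw [G]
  simp only [hk, if_false, show ¬ (j < 2) by omega, hT, dif_pos]
  exact min_le_right _ _

-- one optimal-substructure step: using a clique of size i never hurts
theorem G_step (S : Int) (k j i : Nat) (hi2 : 2 ≤ i) (hij : i ≤ j) (hT : T i ≤ k) :
    G S j k ≤ G S j (k - T i) + (i : Int) := by
  rcases eq_or_lt_of_le hij with rfl | hlt
  · exact G_self_step S k i hi2 hT
  · -- i < j
    rcases Nat.eq_zero_or_pos (k - T i) with hm | hm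
    · -- the remainder is 0: G S j (k - T i) = 0
      rw [hm, G_zero]
      have h1 : G S j k ≤ G S i k := G_mono_j S k (le_of_lt hlt)
      have h2 : G S i k ≤ G S i (k - T i) + (i : Int) := G_step S k i i hi2 le_rfl hT
      rw [hm, G_zero] at h2
      omega
    · by_cases hTj : T j ≤ k - T i
      · -- item j still usable in the remainder
        have hj2 : 2 ≤ j := by omega
        have hGm : G S j (k - T i) =
            min (G S (j - 1) (k - T i)) (G S j (k - T i - T j) + (j : Int)) := by
          conv_lhs => rw [G]
          simp [show ¬ (k - T i = 0) by omega, show ¬ (j < 2) by omega, hTj]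
        have hTi1 : 1 ≤ T i := T_pos hi2
        have hTj1 : 1 ≤ T j := T_pos hj2
        have ha : G S j k ≤ G S (j - 1) (k - T i) + (i : Int) := by
          have h1 : G S j k ≤ G S (j - 1) k := G_mono_j S k (by omega)
          have h2 : G S (j - 1) k ≤ G S (j - 1) (k - T i) + (i : Int) :=
            G_step S k (j - 1) i hi2 (by omega) hT
          omega
        have hb : G S j k ≤ G S j (k - T i - T j) + (j : Int) + (i : Int) := by
          have h1 : G S j k ≤ G S j (k - T j) + (j : Int) := G_self_step S k j hj2 (by omega)
          have h2 : G S j (k - T j) ≤ G S j (k - T j - T i) + (i : Int) :=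
            G_step S (k - T j) j i hi2 hij (by omega)
          have he : k - T j - T i = k - T i - T j := by omega
          rw [he] at h2
          omega
        rcases min_cases (G S (j - 1) (k - T i)) (G S j (k - T i - T j) + (j : Int)) with
          ⟨hmin, _⟩ | ⟨hmin, _⟩ <;> rw [hGm, hmin] <;> omega
      · -- item j not usable in the remainder
        have hj2 : 2 ≤ j := by omega
        have hGm : G S j (k - T i) = G S (j - 1) (k - T i) := G_step_down S hj2 (by omega)
        have h1 : G S j k ≤ G S (j - 1) k := G_mono_j S k (by omega)
        have h2 : G S (j - 1) k ≤ G S (j - 1) (k - T i) + (i : Int) :=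
          G_step S k (j - 1) i hi2 (by omega) hT
        omega
termination_by (j, k)
decreasing_by
  · left; omega
  · left; omega
  · right; have := T_pos hi2; have := T_pos (by omega : 2 ≤ j); omega
  · left; omega

-- the value of G is either the sentinel or achieved by some clique size
theorem G_achieve (S : Int) : ∀ j k, 1 ≤ k →
    G S j k = S ∨ ∃ i, 2 ≤ i ∧ i ≤ j ∧ T i ≤ k ∧ G S j k = G S j (k - T i) + (i : Int) := by
  intro j
  induction j with
  | zero => intro k hk; left; exact G_base S hk (by omega)
  | succ m ih =>
    intro k hk
    rcases Nat.lt_or_ge (m + 1) 2 with h2 | h2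
    · left; exact G_base S hk (by omega)
    · by_cases hT : T (m + 1) ≤ k
      · have hG : G S (m + 1) k =
            min (G S m k) (G S (m + 1) (k - T (m + 1)) + ((m + 1 : Nat) : Int)) := by
          conv_lhs => rw [G]
          simp [show ¬ (k = 0) by omega, show ¬ (m + 1 < 2) by omega, hT]
        rcases min_cases (G S m k) (G S (m + 1) (k - T (m + 1)) + ((m + 1 : Nat) : Int)) with
          ⟨hmin, hle⟩ | ⟨hmin, hlt⟩
        · rcases ih k hk with hS | ⟨i, hi2, him, hik, hiG⟩
          · left; rw [hG, hmin, hS]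
          · right
            refine ⟨i, hi2, by omega, hik, ?_⟩
            have hub : G S (m + 1) k ≤ G S (m + 1) (k - T i) + (i : Int) :=
              G_step S k (m + 1) i hi2 (by omega) hik
            have hlb : G S (m + 1) (k - T i) ≤ G S m (k - T i) :=
              G_mono_j S (k - T i) (by omega)
            rw [hG, hmin, hiG]
            omega
        · right
          exact ⟨m + 1, h2, le_refl _, hT, by rw [hG, hmin]⟩
      · have hG : G S (m + 1) k = G S m k := G_step_down S h2 (by omega)
        rcases ih k hk with hS | ⟨i, hi2, him, hik, hiG⟩
        · left; omega
        · right
          refine ⟨i, hi2, by omega, hik, ?_⟩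
          have hub : G S (m + 1) k ≤ G S (m + 1) (k - T i) + (i : Int) :=
            G_step S k (m + 1) i hi2 (by omega) hik
          have hlb : G S (m + 1) (k - T i) ≤ G S m (k - T i) :=
            G_mono_j S (k - T i) (by omega)
          omega

theorem G_nonneg (S : Int) (hS : 0 ≤ S) : ∀ k j, 0 ≤ G S j k := by
  intro k
  induction k using Nat.strong_induction_on with
  | _ k ih =>
    intro j
    rcases Nat.eq_zero_or_pos k with rfl | hk
    · rw [G_zero]
    · rcases G_achieve S j k hk with h | ⟨i, hi2, _, hiT, hG⟩
      · rw [h]; exact hS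
      · have h1 := ih (k - T i) (by have := T_pos hi2; omega) j
        have h2 : (2 : Int) ≤ (i : Int) := by exact_mod_cast hi2
        omega

-- shape of B's item list: consecutive clique sizes starting at 2, all fitting in p
theorem itemsB_spec (p : Int) : ∀ d i, 2 ≤ i → p.toNat + 3 - i ≤ d → ∃ m,
    itemsB d p i = (List.range' i m).map (fun x => (x * (x - 1) / 2, x)) ∧
    ¬ (((T (i + m) : Nat) : Int) ≤ p) ∧
    (∀ x, i ≤ x → x < i + m → ((T x : Nat) : Int) ≤ p) := by
  intro d
  induction d with
  | zero =>
    intro i hi hd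
    refine ⟨0, by rw [itemsB]; simp, ?_, by omega⟩
    rw [Nat.add_zero, T_eq]
    have h1 := pv_tri_lb i hi
    omega
  | succ d ih =>
    intro i hi hd
    rw [itemsB]
    by_cases h : ((i * (i - 1) / 2 : Nat) : Int) ≤ p
    · rw [if_pos h]
      have h1 := pv_tri_lb i hi
      obtain ⟨m, hm1, hm2, hm3⟩ := ih (i + 1) (by omega) (by omega)
      refine ⟨m + 1, ?_, ?_, ?_⟩
      · rw [List.range'_succ, List.map_cons, hm1]
      · rw [show i + (m + 1) = (i + 1) + m by omega]; exact hm2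
      · intro x hx1 hx2
        rcases Nat.eq_or_lt_of_le hx1 with rfl | hlt
        · rw [T_eq]; exact h
        · exact hm3 x (by omega) (by omega)
    · rw [if_neg h]
      refine ⟨0, by simp, ?_, by omega⟩
      rw [Nat.add_zero, T_eq]
      exact h

-- A's inner while loop computes dp[k] = G S J k and leaves every other entry alone
theorem solveWhile_spec (n : Nat) (S : Int) (J : Nat)
    (HJ : ∀ i', 2 ≤ i' → T i' ≤ n → i' ≤ J)
    (k : Nat) (hk1 : 1 ≤ k) (hkn : k ≤ n) :
    ∀ d i (dp : List Int), k + 3 - i ≤ d → 2 ≤ i → dp.length = n + 1 →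
    (∀ k', k' < k → dp.getD k' 0 = G S J k') →
    G S J k ≤ dp.getD k 0 → dp.getD k 0 ≤ S →
    (∀ i', 2 ≤ i' → i' < i → T i' ≤ k → dp.getD k 0 ≤ G S J (k - T i') + (i' : Int)) →
    (solveWhile d k i dp).length = n + 1 ∧
    (∀ k', k' ≠ k → (solveWhile d k i dp).getD k' 0 = dp.getD k' 0) ∧
    (solveWhile d k i dp).getD k 0 = G S J k := by
  intro d
  induction d with
  | zero =>
    intro i dp hd hi2 hlen hbelow hlb hub hcand
    have hTi : k < T i := by
      have h1 := pv_tri_lb i hi2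
      rw [← T_eq] at h1
      omega
    rw [solveWhile]
    refine ⟨hlen, fun _ _ => rfl, ?_⟩
    rcases G_achieve S J k hk1 with hS | ⟨i0, hi02, hi0J, hi0T, hi0G⟩
    · omega
    · have hi0lt : i0 < i := by
        by_contra hcon
        have := T_mono (show i ≤ i0 by omega)
        omega
      have := hcand i0 hi02 hi0lt hi0T
      omega
  | succ d ih =>
    intro i dp hd hi2 hlen hbelow hlb hub hcand
    by_cases hTi : T i ≤ k
    · have hcast : bc2 (i : Int) ≤ (k : Int) := by
        rw [pv_bc2_natCast, ← T_eq]; exact_mod_cast hTi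
      rw [solveWhile, if_pos hcast]
      have hTnat : (bc2 (i : Int)).toNat = T i := by
        rw [pv_bc2_natCast, ← T_eq]; simp
      have hT1 : 1 ≤ T i := T_pos hi2
      have hread : dp.getD (k - (bc2 (i : Int)).toNat) 0 = G S J (k - T i) := by
        rw [hTnat]; exact hbelow _ (by omega)
      set v := min (dp.getD k 0) (dp.getD (k - (bc2 (i : Int)).toNat) 0 + (i : Int)) with hv
      have hkl : k < dp.length := by omega
      have hset_k : (dp.set k v).getD k 0 = v := by
        simp [List.getD_eq_getElem?_getD, hkl]
      have hset_ne : ∀ k', k' ≠ k → (dp.set k v).getD k' 0 = dp.getD k' 0 := by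
        intro k' hk'
        simp [List.getD_eq_getElem?_getD, Ne.symm hk']
      have hiJ : i ≤ J := HJ i hi2 (by omega)
      have hstep := G_step S k J i hi2 hiJ hTi
      obtain ⟨c1, c2, c3⟩ := ih (i + 1) (dp.set k v) (by omega) (by omega)
        (by rw [List.length_set]; exact hlen)
        (fun k' hk' => by rw [hset_ne k' (by omega)]; exact hbelow k' hk')
        (by rw [hset_k, hv, hread]; exact le_min hlb (by omega))
        (by rw [hset_k]; exact le_trans (min_le_left _ _) hub)
        (by
          intro i' hi'2 hi'lt hi'T
          rw [hset_k]
          rcases Nat.lt_or_ge i' i with hlt | hge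
          · exact le_trans (min_le_left _ _) (hcand i' hi'2 hlt hi'T)
          · have : i' = i := by omega
            subst this
            rw [hv, hread]
            exact min_le_right _ _)
      refine ⟨c1, ?_, c3⟩
      intro k' hk'
      rw [c2 k' hk', hset_ne k' hk']
    · rw [solveWhile, if_neg (by rw [pv_bc2_natCast, ← T_eq]; exact_mod_cast by omega)]
      refine ⟨hlen, fun _ _ => rfl, ?_⟩
      rcases G_achieve S J k hk1 with hS | ⟨i0, hi02, hi0J, hi0T, hi0G⟩
      · omega
      · have hi0lt : i0 < i := by
          by_contra hcon
          have := T_mono (show i ≤ i0 by omega)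
          omega
        have := hcand i0 hi02 hi0lt hi0T
        omega

-- A's outer loop: after the first m iterations, dp[k] = G S J k for k ≤ m
theorem foldA_spec (n : Nat) (S : Int) (J : Nat)
    (HJ : ∀ i', 2 ≤ i' → T i' ≤ n → i' ≤ J)
    (dp0 : List Int) (h0len : dp0.length = n + 1)
    (h0 : ∀ k', k' ≤ n → dp0.getD k' 0 = if k' = 0 then 0 else S) :
    ∀ m, m ≤ n →
    ((List.range' 1 m).foldl (fun dp k => solveWhile (k + 1) k 2 dp) dp0).length = n + 1 ∧
    (∀ k', k' ≤ n →
      ((List.range' 1 m).foldl (fun dp k => solveWhile (k + 1) k 2 dp) dp0).getD k' 0 =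
        if k' ≤ m then G S J k' else S) := by
  intro m
  induction m with
  | zero =>
    intro _
    simp only [List.range'_zero, List.foldl_nil]
    refine ⟨h0len, fun k' hk' => ?_⟩
    rw [h0 k' hk']
    rcases Nat.eq_zero_or_pos k' with rfl | hpos
    · simp [G_zero]
    · simp [show ¬ (k' = 0) by omega, show ¬ (k' ≤ 0) by omega]
  | succ m ih =>
    intro hm
    obtain ⟨ilen, ival⟩ := ih (by omega)
    rw [List.range'_1_concat, List.foldl_append, List.foldl_cons, List.foldl_nil]
    set dpm := (List.range' 1 m).foldl (fun dp k => solveWhile (k + 1) k 2 dp) dp0 with hdpm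
    obtain ⟨c1, c2, c3⟩ := solveWhile_spec n S J HJ (1 + m) (by omega) (by omega)
      ((1 + m) + 1) 2 dpm (by omega) (by omega) ilen
      (fun k' hk' => by
        rw [ival k' (by omega), if_pos (by omega)])
      (by rw [ival (1 + m) (by omega), if_neg (by omega)]; exact G_le_S S (by omega))
      (by rw [ival (1 + m) (by omega), if_neg (by omega)])
      (fun i' hi'2 hi'lt _ => by omega)
    refine ⟨c1, fun k' hk' => ?_⟩
    rcases eq_or_ne k' (1 + m) with rfl | hne
    · rw [c3, if_pos (by omega)]
    · rw [c2 k' hne, ival k' hk']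
      rcases Nat.lt_or_ge k' (1 + m) with h | h
      · rw [if_pos (by omega), if_pos (by omega)]
      · rw [if_neg (by omega), if_neg (by omega)]

-- ===== B-side lemmas: uniform-cost search =====

-- B's relax fold over the item list: only decreases entries, keeps the G lower bound,
-- and afterwards every edge out of the settled source k has been relaxed
theorem relaxFold_spec (n : Nat) (S : Int) (J : Nat) (c k : Nat)
    (hkG : G S J k = (c : Int)) :
    ∀ q a (dist : List Int), 2 ≤ a → a + q ≤ J + 1 → dist.length = n + 1 →
    (∀ k', k' ≤ n → G S J k' ≤ dist.getD k' 0) →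
    (((List.range' a q).map (fun x => (T x, x))).foldl
        (fun dist ts =>
          if k + ts.1 ≤ n ∧ ((c + ts.2 : Nat) : Int) < dist.getD (k + ts.1) 0 then
            dist.set (k + ts.1) ((c + ts.2 : Nat) : Int)
          else dist) dist).length = n + 1 ∧
    (∀ k', k' ≤ n → G S J k' ≤
      (((List.range' a q).map (fun x => (T x, x))).foldl
        (fun dist ts =>
          if k + ts.1 ≤ n ∧ ((c + ts.2 : Nat) : Int) < dist.getD (k + ts.1) 0 then
            dist.set (k + ts.1) ((c + ts.2 : Nat) : Int)
          else dist) dist).getD k' 0) ∧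
    (∀ k', k' ≤ n →
      (((List.range' a q).map (fun x => (T x, x))).foldl
        (fun dist ts =>
          if k + ts.1 ≤ n ∧ ((c + ts.2 : Nat) : Int) < dist.getD (k + ts.1) 0 then
            dist.set (k + ts.1) ((c + ts.2 : Nat) : Int)
          else dist) dist).getD k' 0 ≤ dist.getD k' 0) ∧
    (∀ x, a ≤ x → x < a + q → k + T x ≤ n →
      (((List.range' a q).map (fun x => (T x, x))).foldl
        (fun dist ts =>
          if k + ts.1 ≤ n ∧ ((c + ts.2 : Nat) : Int) < dist.getD (k + ts.1) 0 then
            dist.set (k + ts.1) ((c + ts.2 : Nat) : Int)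
          else dist) dist).getD (k + T x) 0 ≤ ((c + x : Nat) : Int)) := by
  intro q
  induction q with
  | zero =>
    intro a dist _ _ hlen hlb
    simp only [List.range'_zero, List.map_nil, List.foldl_nil]
    exact ⟨hlen, hlb, fun _ _ => le_refl _, fun x hx1 hx2 _ => by omega⟩
  | succ q ih =>
    intro a dist ha2 haq hlen hlb
    rw [List.range'_succ, List.map_cons, List.foldl_cons]
    set dist1 := (if k + T a ≤ n ∧ ((c + a : Nat) : Int) < dist.getD (k + T a) 0 then
        dist.set (k + T a) ((c + a : Nat) : Int) else dist) with hdist1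
    have haJ : a ≤ J := by omega
    have hGstep : G S J (k + T a) ≤ ((c + a : Nat) : Int) := by
      have h1 := G_step S (k + T a) J a ha2 haJ (by omega)
      rw [show k + T a - T a = k by omega, hkG] at h1
      push_cast
      omega
    have h1len : dist1.length = n + 1 := by
      rw [hdist1]; split
      · rw [List.length_set]; exact hlen
      · exact hlen
    have h1lb : ∀ k', k' ≤ n → G S J k' ≤ dist1.getD k' 0 := by
      intro k' hk'
      rw [hdist1]; split
      · rcases eq_or_ne k' (k + T a) with rfl | hne
        · rw [show (dist.set (k + T a) ((c + a : Nat) : Int)).getD (k + T a) 0 =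
              ((c + a : Nat) : Int) by
            simp [List.getD_eq_getElem?_getD, show k + T a < dist.length by omega]]
          exact hGstep
        · rw [show (dist.set (k + T a) ((c + a : Nat) : Int)).getD k' 0 = dist.getD k' 0 by
            simp [List.getD_eq_getElem?_getD, Ne.symm hne]]
          exact hlb k' hk'
      · exact hlb k' hk'
    have h1mono : ∀ k', k' ≤ n → dist1.getD k' 0 ≤ dist.getD k' 0 := by
      intro k' hk'
      rw [hdist1]; split
      · rename_i hcond
        rcases eq_or_ne k' (k + T a) with rfl | hne
        · rw [show (dist.set (k + T a) ((c + a : Nat) : Int)).getD (k + T a) 0 =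
              ((c + a : Nat) : Int) by
            simp [List.getD_eq_getElem?_getD, show k + T a < dist.length by omega]]
          exact le_of_lt hcond.2
        · rw [show (dist.set (k + T a) ((c + a : Nat) : Int)).getD k' 0 = dist.getD k' 0 by
            simp [List.getD_eq_getElem?_getD, Ne.symm hne]]
      · exact le_refl _
    have h1head : k + T a ≤ n → dist1.getD (k + T a) 0 ≤ ((c + a : Nat) : Int) := by
      intro hkn
      rw [hdist1]
      by_cases hcond : ((c + a : Nat) : Int) < dist.getD (k + T a) 0
      · rw [if_pos ⟨hkn, hcond⟩]
        rw [show (dist.set (k + T a) ((c + a : Nat) : Int)).getD (k + T a) 0 =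
            ((c + a : Nat) : Int) by
          simp [List.getD_eq_getElem?_getD, show k + T a < dist.length by omega]]
      · rw [if_neg (by tauto)]
        omega
    obtain ⟨c1, c2, c3, c4⟩ := ih (a + 1) dist1 (by omega) (by omega) h1len h1lb
    refine ⟨c1, c2, ?_, ?_⟩
    · intro k' hk'
      exact le_trans (c3 k' hk') (h1mono k' hk')
    · intro x hx1 hx2 hxn
      rcases Nat.eq_or_lt_of_le hx1 with hxeq | hlt
      · subst hxeq
        exact le_trans (c3 _ hxn) (h1head hxn)
      · exact c4 x (by omega) (by omega) hxn

-- derived settled-ness: under the loop invariant, every state whose true cost is ≤ c + 1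
-- already carries its exact value
theorem settled_of_inv (n : Nat) (S : Int) (J : Nat) (c : Nat)
    (dist : List Int)
    (hlb : ∀ k, k ≤ n → G S J k ≤ dist.getD k 0)
    (hub : ∀ k, k ≤ n → dist.getD k 0 ≤ S)
    (h0 : dist.getD 0 0 = 0)
    (hrel : ∀ k x, k ≤ n → 2 ≤ x → x ≤ J → T x ≤ k → G S J (k - T x) ≤ (c : Int) - 1 →
        dist.getD k 0 ≤ G S J (k - T x) + (x : Int)) :
    ∀ k, k ≤ n → G S J k ≤ (c : Int) + 1 → dist.getD k 0 = G S J k := by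
  intro k hk hGc
  rcases Nat.eq_zero_or_pos k with rfl | hk1
  · rw [h0, G_zero]
  · rcases G_achieve S J k hk1 with hS | ⟨x, hx2, hxJ, hxT, hxG⟩
    · have := hlb k hk
      have := hub k hk
      omega
    · have hx2' : (2 : Int) ≤ (x : Int) := by exact_mod_cast hx2
      have hpred : G S J (k - T x) ≤ (c : Int) - 1 := by omega
      have := hrel k x hk hx2 hxJ hxT hpred
      have := hlb k hk
      omega

-- B's scan of one layer: processes every index in the window, relaxing from each settled
-- source of cost exactly c; entries only decrease and the G lower bound is kept
theorem scanAux (n m J : Nat) (S : Int) (hmJ : 2 + m = J + 1) (c : Nat)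
    (dist0 : List Int)
    (hlb0 : ∀ k, k ≤ n → G S J k ≤ dist0.getD k 0)
    (hub0 : ∀ k, k ≤ n → dist0.getD k 0 ≤ S)
    (h00 : dist0.getD 0 0 = 0)
    (hrel0 : ∀ k x, k ≤ n → 2 ≤ x → x ≤ J → T x ≤ k → G S J (k - T x) ≤ (c : Int) - 1 →
        dist0.getD k 0 ≤ G S J (k - T x) + (x : Int)) :
    ∀ q b (dist : List Int), b + q = n + 1 → dist.length = n + 1 →
    (∀ k, k ≤ n → G S J k ≤ dist.getD k 0) →
    (∀ k, k ≤ n → dist.getD k 0 ≤ dist0.getD k 0) →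
    ((List.range' b q).foldl
        (fun dist k => if dist.getD k 0 = (c : Int) then
          relaxB ((List.range' 2 m).map (fun x => (T x, x))) n c k dist else dist)
        dist).length = n + 1 ∧
    (∀ k, k ≤ n → G S J k ≤
      ((List.range' b q).foldl
        (fun dist k => if dist.getD k 0 = (c : Int) then
          relaxB ((List.range' 2 m).map (fun x => (T x, x))) n c k dist else dist)
        dist).getD k 0) ∧
    (∀ k, k ≤ n →
      ((List.range' b q).foldl
        (fun dist k => if dist.getD k 0 = (c : Int) then
          relaxB ((List.range' 2 m).map (fun x => (T x, x))) n c k dist else dist)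
        dist).getD k 0 ≤ dist.getD k 0) ∧
    (∀ k x, k ≤ n → 2 ≤ x → x ≤ J → T x ≤ k → b ≤ k - T x → G S J (k - T x) = (c : Int) →
      ((List.range' b q).foldl
        (fun dist k => if dist.getD k 0 = (c : Int) then
          relaxB ((List.range' 2 m).map (fun x => (T x, x))) n c k dist else dist)
        dist).getD k 0 ≤ G S J (k - T x) + (x : Int)) := by
  intro q
  induction q with
  | zero =>
    intro b dist hbq hlen hlb hmono
    simp only [List.range'_zero, List.foldl_nil]
    refine ⟨hlen, hlb, fun _ _ => le_refl _, ?_⟩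
    intro k x hk hx2 hxJ hxT hbk hGc
    have hT1 : 1 ≤ T x := T_pos hx2
    omega
  | succ q ih =>
    intro b dist hbq hlen hlb hmono
    rw [List.range'_succ, List.foldl_cons]
    have hbn : b ≤ n := by omega
    by_cases hb : dist.getD b 0 = (c : Int)
    · rw [if_pos hb]
      have hGb : G S J b = (c : Int) := by
        have h1 : G S J b ≤ (c : Int) := by rw [← hb]; exact hlb b hbn
        by_contra hne
        have h2 : G S J b ≤ (c : Int) - 1 := by omega
        have h3 := settled_of_inv n S J c dist0 hlb0 hub0 h00 hrel0 b hbn (by omega)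
        have h4 := hmono b hbn
        omega
      obtain ⟨r1, r2, r3, r4⟩ := relaxFold_spec n S J c b hGb m 2
        dist (le_refl _) (by omega) hlen hlb
      have r1' : (relaxB ((List.range' 2 m).map (fun x => (T x, x))) n c b dist).length
          = n + 1 := r1
      have r2' : ∀ k', k' ≤ n → G S J k' ≤
          (relaxB ((List.range' 2 m).map (fun x => (T x, x))) n c b dist).getD k' 0 := r2
      have r3' : ∀ k', k' ≤ n →
          (relaxB ((List.range' 2 m).map (fun x => (T x, x))) n c b dist).getD k' 0 ≤
            dist.getD k' 0 := r3
      have r4' : ∀ x, 2 ≤ x → x < 2 + m → b + T x ≤ n →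
          (relaxB ((List.range' 2 m).map (fun x => (T x, x))) n c b dist).getD (b + T x) 0 ≤
            ((c + x : Nat) : Int) := fun x h1 h2 h3 => r4 x h1 h2 h3
      obtain ⟨d1, d2, d3, d4⟩ := ih (b + 1)
        (relaxB ((List.range' 2 m).map (fun x => (T x, x))) n c b dist)
        (by omega) r1' r2' (fun k hk => le_trans (r3' k hk) (hmono k hk))
      refine ⟨d1, d2, fun k hk => le_trans (d3 k hk) (r3' k hk), ?_⟩
      intro k x hk hx2 hxJ hxT hbk hGc
      rcases Nat.eq_or_lt_of_le hbk with hbeq | hblt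
      · -- the source is b itself: the head relax step handled edge x
        have hkb : k = b + T x := by omega
        have h4 := r4' x hx2 (by omega) (by rw [← hkb]; exact hk)
        rw [← hkb] at h4
        have h5 := d3 k hk
        rw [hGc]
        push_cast at h4
        omega
      · exact d4 k x hk hx2 hxJ hxT (by omega) hGc
    · rw [if_neg hb]
      obtain ⟨d1, d2, d3, d4⟩ := ih (b + 1) dist (by omega) hlen hlb hmono
      refine ⟨d1, d2, d3, ?_⟩
      intro k x hk hx2 hxJ hxT hbk hGc
      rcases Nat.eq_or_lt_of_le hbk with hbeq | hblt
      · -- impossible: the source b would then already carry value c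
        exfalso
        have h1 := settled_of_inv n S J c dist0 hlb0 hub0 h00 hrel0 (k - T x)
          (by omega) (by omega)
        have h2 := hmono (k - T x) (by omega)
        have h3 := hlb (k - T x) (by omega)
        rw [← hbeq] at h1 h2 h3
        rw [h1] at h2
        rw [← hbeq] at hGc
        omega
      · exact d4 k x hk hx2 hxJ hxT (by omega) hGc

-- one full layer of B's search preserves the invariant, advancing the settled frontier
theorem layerB_inv (n m J : Nat) (S : Int) (hmJ : 2 + m = J + 1) (c : Nat)
    (dist : List Int) (hlen : dist.length = n + 1)
    (hlb : ∀ k, k ≤ n → G S J k ≤ dist.getD k 0)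
    (hub : ∀ k, k ≤ n → dist.getD k 0 ≤ S)
    (h0 : dist.getD 0 0 = 0)
    (hrel : ∀ k x, k ≤ n → 2 ≤ x → x ≤ J → T x ≤ k → G S J (k - T x) ≤ (c : Int) - 1 →
        dist.getD k 0 ≤ G S J (k - T x) + (x : Int)) :
    (layerB ((List.range' 2 m).map (fun x => (T x, x))) n c dist).length = n + 1 ∧
    (∀ k, k ≤ n → G S J k ≤
      (layerB ((List.range' 2 m).map (fun x => (T x, x))) n c dist).getD k 0) ∧
    (∀ k, k ≤ n → (layerB ((List.range' 2 m).map (fun x => (T x, x))) n c dist).getD k 0 ≤ S) ∧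
    (layerB ((List.range' 2 m).map (fun x => (T x, x))) n c dist).getD 0 0 = 0 ∧
    (∀ k x, k ≤ n → 2 ≤ x → x ≤ J → T x ≤ k → G S J (k - T x) ≤ ((c + 1 : Nat) : Int) - 1 →
      (layerB ((List.range' 2 m).map (fun x => (T x, x))) n c dist).getD k 0 ≤
        G S J (k - T x) + (x : Int)) := by
  obtain ⟨d1, d2, d3, d4⟩ := scanAux n m J S hmJ c dist hlb hub h0 hrel
    (n + 1) 0 dist (by omega) hlen hlb (fun k hk => le_refl _)
  unfold layerB
  rw [List.range_eq_range']
  refine ⟨d1, d2, fun k hk => le_trans (d3 k hk) (hub k hk), ?_, ?_⟩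
  · have hlb0' := d2 0 (by omega)
    have hmono0 := d3 0 (by omega)
    rw [G_zero] at hlb0'
    omega
  · intro k x hk hx2 hxJ hxT hGc
    push_cast at hGc
    rcases lt_or_ge (G S J (k - T x)) ((c : Int)) with hlt | hge
    · have h1 := hrel k x hk hx2 hxJ hxT (by omega)
      have h2 := d3 k hk
      omega
    · have hGeq : G S J (k - T x) = (c : Int) := by omega
      exact d4 k x hk hx2 hxJ hxT (by omega) hGeq

-- B's outer while loop reaches the true value of dist[n]
theorem loopB_spec (n m J : Nat) (S : Int) (hmJ : 2 + m = J + 1) :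
    ∀ (fuel c : Nat) (dist : List Int), dist.length = n + 1 →
    (∀ k, k ≤ n → G S J k ≤ dist.getD k 0) →
    (∀ k, k ≤ n → dist.getD k 0 ≤ S) →
    dist.getD 0 0 = 0 →
    (∀ k x, k ≤ n → 2 ≤ x → x ≤ J → T x ≤ k → G S J (k - T x) ≤ (c : Int) - 1 →
        dist.getD k 0 ≤ G S J (k - T x) + (x : Int)) →
    G S J n ≤ (c : Int) + (fuel : Int) →
    (loopB ((List.range' 2 m).map (fun x => (T x, x))) n fuel c dist).getD n 0 = G S J n := by
  intro fuel
  induction fuel with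
  | zero =>
    intro c dist hlen hlb hub h0 hrel hfuel
    rw [loopB]
    exact settled_of_inv n S J c dist hlb hub h0 hrel n (le_refl _) (by push_cast at hfuel ⊢; omega)
  | succ fuel ih =>
    intro c dist hlen hlb hub h0 hrel hfuel
    rw [loopB]
    by_cases hcond : (c : Int) < dist.getD n 0
    · rw [if_pos hcond]
      obtain ⟨l1, l2, l3, l4, l5⟩ := layerB_inv n m J S hmJ c dist hlen hlb hub h0 hrel
      have hGn : (c : Int) + 1 ≤ G S J n := by
        by_contra hcon
        have := settled_of_inv n S J c dist hlb hub h0 hrel n (le_refl _) (by omega)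
        omega
      exact ih (c + 1) _ l1 l2 l3 l4 (by push_cast at l5 ⊢; exact l5) (by push_cast at hfuel ⊢; omega)
    · rw [if_neg hcond]
      have h1 := hlb n (le_refl _)
      exact settled_of_inv n S J c dist hlb hub h0 hrel n (le_refl _) (by omega)

-- ===== VERDICT (by name: the statement is the Claim_ definition above) =====
theorem solve_spec : Claim_equal_solve := by
  intro p _ hpre
  obtain ⟨hp0, _⟩ := hpre
  unfold Spec_solve
  set n := p.toNat with hn
  have hpn : (n : Int) = p := Int.toNat_of_nonneg hp0
  obtain ⟨m, hitems, hstop, hall⟩ := itemsB_spec p (p.toNat + 1) 2 (le_refl _) (by omega)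
  set S := 2 * p with hS
  set J := m + 1 with hJ
  have HJ : ∀ i', 2 ≤ i' → T i' ≤ n → i' ≤ J := by
    intro i' h2 hT
    by_contra hcon
    have h1 : T (2 + m) ≤ T i' := T_mono (by omega)
    have hx : ((T (2 + m) : Nat) : Int) ≤ ((T i' : Nat) : Int) := by exact_mod_cast h1
    omega
  have h0len : ((List.replicate (n + 1) S).set 0 0).length = n + 1 := by simp
  have h0 : ∀ k', k' ≤ n →
      ((List.replicate (n + 1) S).set 0 0).getD k' 0 = if k' = 0 then 0 else S := by
    intro k' hk'
    rcases eq_or_ne k' 0 with rfl | hne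
    · simp [List.getD_eq_getElem?_getD]
    · rw [if_neg hne]
      simp [List.getD_eq_getElem?_getD, show k' < n + 1 by omega, Ne.symm hne]
  obtain ⟨alen, aval⟩ := foldA_spec n S J HJ _ h0len h0 n (le_refl _)
  have hA := aval n (le_refl _)
  rw [if_pos (le_refl _)] at hA
  -- B side
  have hS0 : (0 : Int) ≤ S := by omega
  have hB := loopB_spec n m J S (by omega) (2 * n + 1) 0
    ((List.replicate (n + 1) S).set 0 0) h0len
    (by
      intro k hk
      rw [h0 k hk]
      rcases eq_or_ne k 0 with rfl | hne
      · rw [if_pos rfl, G_zero]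
      · rw [if_neg hne]; exact G_le_S S (by omega))
    (by
      intro k hk
      rw [h0 k hk]
      rcases eq_or_ne k 0 with rfl | hne
      · rw [if_pos rfl]; exact hS0
      · rw [if_neg hne])
    (by rw [h0 0 (by omega), if_pos rfl])
    (by
      intro k x hk hx2 hxJ hxT hneg
      have := G_nonneg S hS0 (k - T x) J
      have : ((0 : Nat) : Int) - 1 < 0 := by norm_num
      omega)
    (by
      have h1 : G S J n ≤ S := by
        rcases Nat.eq_zero_or_pos n with hn0 | hn1
        · rw [hn0, G_zero]; exact hS0
        · exact G_le_S S hn1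
      push_cast
      omega)
  have hmapeq : (fun x : Nat => (x * (x - 1) / 2, x)) = (fun x : Nat => (T x, x)) := by
    funext x
    rw [T_eq]
  simp only [solve, solve_alt]
  rw [← hn, ← hS, hitems, hmapeq, hA, hB]
  rfl
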